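-- pv_equiv track=rewrite | github.com/rostusas/krsbi_ros2 | krsbi_pkg/krsbi_pkg/robot_movement_manual_node.py | checkRotationCriteria
-- ===== SOURCE A (Python) =====
-- def checkRotationCriteria(rotation, wheel, speed):
--
--     if(speed == 0):
--         wheel = [rotation,rotation,rotation]
--         return wheel
--     for i,value in enumerate(wheel):
--         if (value*rotation >= 0 or (value == rotation)):
--             if(sorted([a for a in wheel if a*rotation >= 0 ]).index(value) == 0):
--                 wheel[i] = (value + rotation) if (value+rotation) <=255 and (value+rotation)>=-255 else 255 if value >=0 else -255
--                 break
--     return wheel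
-- ===== SOURCE B (Python) =====
-- def checkRotationCriteria(rotation, wheel, speed):
--     if speed == 0:
--         return [rotation, rotation, rotation]
--     compatible = [a for a in wheel if a * rotation >= 0]
--     if compatible:
--         m = min(compatible)
--         i = wheel.index(m)
--         s = m + rotation
--         wheel[i] = s if -255 <= s <= 255 else (255 if m >= 0 else -255)
--     return wheel
-- ===== Notes on version B (the rewrite author's own statement) =====
-- stated objective: faster
-- what changed: A's loop re-sorts the sign-compatible sublist and calls .index on it for every candidate element; B computes the minimum of that sublist once, locates its first occurrence with a single wheel.index, and clamps it, removing the per-element sort-and-scan.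
import Mathlib
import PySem

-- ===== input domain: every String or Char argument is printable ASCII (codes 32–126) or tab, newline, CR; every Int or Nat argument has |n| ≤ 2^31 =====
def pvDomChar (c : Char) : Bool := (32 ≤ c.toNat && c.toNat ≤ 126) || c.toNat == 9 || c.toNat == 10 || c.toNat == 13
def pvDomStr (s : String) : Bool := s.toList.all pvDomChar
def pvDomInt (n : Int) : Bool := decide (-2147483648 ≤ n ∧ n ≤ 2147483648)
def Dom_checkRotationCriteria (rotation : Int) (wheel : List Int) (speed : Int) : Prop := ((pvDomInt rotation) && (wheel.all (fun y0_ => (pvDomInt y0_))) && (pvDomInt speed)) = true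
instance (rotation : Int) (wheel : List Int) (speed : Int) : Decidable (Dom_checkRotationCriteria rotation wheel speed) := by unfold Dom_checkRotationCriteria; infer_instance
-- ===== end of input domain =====

-- B replaces A's per-element sorted(...).index(...)==0 re-scan by a one-time min of the
-- sign-compatible sublist and a single wheel.index lookup (simpler; same return value; both
-- Pythons mutate `wheel` in place identically when speed != 0).


-- ===== PORT A =====
-- the for-loop of A over enumerate(wheel); `wheel` is the full list (used by the inner
-- sorted-filter re-scan and by the wheel[i] = … assignment)
def pvLoopA (rotation : Int) (wheel : List Int) : List (Int × Int) → List Int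
  | [] => wheel
  | (i, value) :: rest =>
    if value * rotation ≥ 0 ∨ value = rotation then
      if PySem.List.index?
           (PySem.List.sorted (wheel.filter (fun a => decide (a * rotation ≥ 0))) (fun x => x) false)
           value = some 0 then
        wheel.set i.toNat
          (if value + rotation ≤ 255 ∧ value + rotation ≥ -255 then value + rotation
           else if value ≥ 0 then 255 else -255)
      else pvLoopA rotation wheel rest
    else pvLoopA rotation wheel rest

def checkRotationCriteria (rotation : Int) (wheel : List Int) (speed : Int) : List Int :=
  if speed = 0 then [rotation, rotation, rotation]
  else pvLoopA rotation wheel (PySem.List.enumerate wheel 0)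

-- ===== PORT B =====
def checkRotationCriteria_alt (rotation : Int) (wheel : List Int) (speed : Int) : List Int :=
  if speed = 0 then [rotation, rotation, rotation]
  else
    let compatible := wheel.filter (fun a => decide (a * rotation ≥ 0))
    match PySem.List.min? compatible (fun x => x) with
    | none => wheel
    | some m =>
      match PySem.List.index? wheel m with
      | none => wheel   -- unreachable: m ∈ compatible ⊆ wheel
      | some i =>
        let s := m + rotation
        wheel.set i (if -255 ≤ s ∧ s ≤ 255 then s else if m ≥ 0 then 255 else -255)

-- ===== PRECONDITION & SPEC =====
def Spec_checkRotationCriteria (rotation : Int) (wheel : List Int) (speed : Int) (out : List Int) : Prop := out = checkRotationCriteria_alt rotation wheel speed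
instance (rotation : Int) (wheel : List Int) (speed : Int) (out : List Int) : Decidable (Spec_checkRotationCriteria rotation wheel speed out) := by unfold Spec_checkRotationCriteria; infer_instance

-- ===== CLAIM (what is proved, stated in full; the proofs are below) =====
def Claim_equal_checkRotationCriteria : Prop := ∀ (rotation : Int) (wheel : List Int) (speed : Int), Dom_checkRotationCriteria rotation wheel speed → Spec_checkRotationCriteria rotation wheel speed (checkRotationCriteria rotation wheel speed)

-- ===== LEMMAS AND PROOFS =====

-- A's redundant second disjunct: value == rotation already implies value*rotation >= 0
theorem pv_cond_iff (rotation value : Int) :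
    (value * rotation ≥ 0 ∨ value = rotation) ↔ value * rotation ≥ 0 := by
  constructor
  · rintro (h | rfl)
    · exact h
    · exact mul_self_nonneg value
  · exact Or.inl

-- index in the sorted compatible list is 0 exactly for the minimum value
theorem pv_index_sorted_zero_iff (xs : List Int) (m v : Int)
    (hm : PySem.List.min? xs (fun x => x) = some m) :
    PySem.List.index? (PySem.List.sorted xs (fun x => x) false) v = some 0 ↔ v = m := by
  have hmem := PySem.List.min?_mem hm
  have hmin := PySem.List.min?_isMin hm
  rcases hs : PySem.List.sorted xs (fun x => x) false with _ | ⟨h, t⟩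
  · exact absurd ((PySem.List.sorted_eq_nil_iff _ _ _).mp hs ▸ hmem) (List.not_mem_nil)
  · have hhx : h ∈ xs := by
      have : h ∈ PySem.List.sorted xs (fun x => x) false := by rw [hs]; exact List.mem_cons_self
      exact (PySem.List.mem_sorted _ _ _ _).mp this
    have hms : m ∈ h :: t := by
      rw [← hs]; exact (PySem.List.mem_sorted _ _ _ _).mpr hmem
    have hpw := PySem.List.sorted_pairwise (xs := xs) (key := fun x => x)
    rw [hs, List.pairwise_cons] at hpw
    have hhm : h = m := by
      rcases List.mem_cons.mp hms with h1 | h2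
      · exact h1.symm
      · exact le_antisymm (hpw.1 m h2) (hmin h hhx)
    subst hhm
    constructor
    · intro h0
      by_contra hne
      rw [PySem.List.index?_cons_of_ne _ (Ne.symm hne)] at h0
      cases hik : PySem.List.index? t v <;> rw [hik] at h0 <;> simp at h0
    · rintro rfl; exact PySem.List.index?_cons_self _ _

-- when no element is sign-compatible, the guard never fires and A's loop returns wheel
theorem pv_loopA_nil (rotation : Int) (wheel : List Int)
    (hnil : wheel.filter (fun a => decide (a * rotation ≥ 0)) = []) :
    ∀ (l : List Int) (k : Int), (∀ v ∈ l, v ∈ wheel) →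
      pvLoopA rotation wheel (PySem.List.enumerate l k) = wheel := by
  intro l
  induction l with
  | nil => intro k _; simp [PySem.List.enumerate_nil, pvLoopA]
  | cons v rest ih =>
    intro k hsub
    rw [PySem.List.enumerate_cons, pvLoopA, if_neg, ih (k + 1)
      (fun x hx => hsub x (List.mem_cons_of_mem _ hx))]
    intro hc
    have hvr : v * rotation ≥ 0 := (pv_cond_iff rotation v).mp hc
    have : v ∈ wheel.filter (fun a => decide (a * rotation ≥ 0)) :=
      List.mem_filter.mpr ⟨hsub v List.mem_cons_self, decide_eq_true hvr⟩
    rw [hnil] at this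
    exact List.not_mem_nil this

-- the loop of A, characterized: it rewrites the first occurrence of the minimum m
theorem pv_loopA_eq (rotation m : Int) (wheel : List Int)
    (hm : PySem.List.min? (wheel.filter (fun a => decide (a * rotation ≥ 0))) (fun x => x) = some m) :
    ∀ (suf : List Int) (k : Int), 0 ≤ k →
      pvLoopA rotation wheel (PySem.List.enumerate suf k) =
        (match PySem.List.index? suf m with
         | none => wheel
         | some j => wheel.set (k.toNat + j)
             (if m + rotation ≤ 255 ∧ m + rotation ≥ -255 then m + rotation
              else if m ≥ 0 then 255 else -255)) := by
  have hmem := PySem.List.min?_mem hm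
  have hcomp : m * rotation ≥ 0 := of_decide_eq_true (List.mem_filter.mp hmem).2
  intro suf
  induction suf with
  | nil =>
    intro k _
    simp [PySem.List.enumerate_nil, pvLoopA, PySem.List.index?_eq_idxOf?, List.idxOf?]
  | cons v rest ih =>
    intro k hk
    rw [PySem.List.enumerate_cons]
    by_cases hv : v = m
    · subst hv
      rw [pvLoopA, if_pos ((pv_cond_iff rotation v).mpr hcomp),
          if_pos ((pv_index_sorted_zero_iff _ v v hm).mpr rfl),
          PySem.List.index?_cons_self _ _]
      simp
    · have hrec : pvLoopA rotation wheel ((k, v) :: PySem.List.enumerate rest (k + 1)) =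
          pvLoopA rotation wheel (PySem.List.enumerate rest (k + 1)) := by
        rw [pvLoopA]
        by_cases hc : v * rotation ≥ 0 ∨ v = rotation
        · rw [if_pos hc, if_neg]
          intro h0
          exact hv ((pv_index_sorted_zero_iff _ m v hm).mp h0)
        · rw [if_neg hc]
      rw [hrec, ih (k + 1) (by omega),
          PySem.List.index?_cons_of_ne _ hv]
      rcases PySem.List.index? rest m with _ | j
      · simp
      · simp only [Option.map_some]
        congr 1
        omega

-- ===== VERDICT (by name: the statement is the Claim_ definition above) =====
theorem checkRotationCriteria_spec : Claim_equal_checkRotationCriteria := by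
  intro rotation wheel speed _
  unfold Spec_checkRotationCriteria
  by_cases hs : speed = 0
  · simp [checkRotationCriteria, checkRotationCriteria_alt, hs]
  · rcases hm : PySem.List.min? (wheel.filter (fun a => decide (a * rotation ≥ 0))) (fun x => x)
      with _ | m
    · have hB : checkRotationCriteria_alt rotation wheel speed = wheel := by
        simp [checkRotationCriteria_alt, hs, hm]
      have hA : checkRotationCriteria rotation wheel speed = wheel := by
        rw [checkRotationCriteria, if_neg hs]
        exact pv_loopA_nil rotation wheel ((PySem.List.min?_eq_none_iff _ _).mp hm)
          wheel 0 (fun _ h => h)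
      rw [hA, hB]
    · have hmw : m ∈ wheel := (List.mem_filter.mp (PySem.List.min?_mem hm)).1
      rcases hi : PySem.List.index? wheel m with _ | i
      · exact absurd hmw ((PySem.List.index?_eq_none_iff _ _).mp hi)
      · have hi' := hi
        rw [PySem.List.index?_eq_idxOf?] at hi'
        have hB : checkRotationCriteria_alt rotation wheel speed =
            wheel.set i (if -255 ≤ m + rotation ∧ m + rotation ≤ 255 then m + rotation
              else if m ≥ 0 then 255 else -255) := by
          simp [checkRotationCriteria_alt, hs, hm, hi']
        have hA := pv_loopA_eq rotation m wheel hm wheel 0 le_rfl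
        rw [hi] at hA
        rw [checkRotationCriteria, if_neg hs, hA, hB]
        simp only [Int.toNat_zero, Nat.zero_add]
        congr 1
        split_ifs <;> first | rfl | omega
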